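-- pv_equiv track=rewrite | github.com/N4rut0o/Distancia-Maxima-Sapos | comparacao_desempenho.py | solucao_lenta
-- ===== SOURCE A (Python) =====
-- def avancar_direita_lento(blocos, inicio):
--     posicao = inicio
--     while posicao + 1 < len(blocos) and blocos[posicao + 1] >= blocos[posicao]:
--         posicao = posicao + 1
--     return posicao
--
-- def avancar_esquerda_lento(blocos, inicio):
--     posicao = inicio
--     while posicao - 1 >= 0 and blocos[posicao - 1] >= blocos[posicao]:
--         posicao = posicao - 1
--     return posicao
--
-- def solucao_lenta(blocos):
--     # para cada bloco como partida, avança nas duas direcções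
--     # problema: recalcula tudo de novo em cada iteração — O(n²)
--     maior_distancia = 0
--     for i in range(len(blocos)):
--         direita  = avancar_direita_lento(blocos, i)
--         esquerda = avancar_esquerda_lento(blocos, i)
--         distancia = direita - esquerda
--         if distancia > maior_distancia:
--             maior_distancia = distancia
--     return maior_distancia
-- ===== SOURCE B (Python) =====
-- def solucao_lenta(blocos):
--     # Two linear DP passes (left run starts, right run ends), then one max — O(n) instead of O(n^2).
--     n = len(blocos)
--     if n == 0:
--         return 0
--     esquerda = [0]
--     for i in range(1, n):
--         esquerda.append(esquerda[-1] if blocos[i - 1] >= blocos[i] else i)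
--     direita = [n - 1]
--     for i in range(n - 2, -1, -1):
--         direita.append(direita[-1] if blocos[i + 1] >= blocos[i] else i)
--     direita.reverse()
--     return max(direita[i] - esquerda[i] for i in range(n))
-- ===== Notes on version B (the rewrite author's own statement) =====
-- stated objective: faster
-- what changed: Replaces the per-index rescans (walking right and left from every i) with two linear DP passes that precompute each index's run endpoints, then a single max over the differences.
import Mathlib
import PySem

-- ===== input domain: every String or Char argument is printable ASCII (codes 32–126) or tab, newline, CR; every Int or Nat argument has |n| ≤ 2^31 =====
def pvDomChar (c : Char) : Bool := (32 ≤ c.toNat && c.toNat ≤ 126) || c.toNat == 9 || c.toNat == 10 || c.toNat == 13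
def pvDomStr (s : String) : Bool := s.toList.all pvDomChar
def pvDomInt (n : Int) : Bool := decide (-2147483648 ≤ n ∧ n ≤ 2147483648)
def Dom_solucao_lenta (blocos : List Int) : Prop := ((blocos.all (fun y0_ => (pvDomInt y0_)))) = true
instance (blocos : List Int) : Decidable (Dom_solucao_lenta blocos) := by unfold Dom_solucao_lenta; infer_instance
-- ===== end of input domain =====

-- B replaces A's per-index rescans with two linear DP passes over run endpoints, then one max (a different algorithm).

-- ===== PORT A =====
-- while posicao+1 < len(blocos) and blocos[posicao+1] >= blocos[posicao]: posicao += 1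
def avancar_direita_lento (blocos : List Int) (posicao : Nat) : Nat :=
  if h : posicao + 1 < blocos.length ∧
      PySem.List.pyGetD blocos ((posicao : Int) + 1) 0 ≥ PySem.List.pyGetD blocos (posicao : Int) 0 then
    avancar_direita_lento blocos (posicao + 1)
  else
    posicao
termination_by blocos.length - posicao
decreasing_by omega

-- while posicao-1 >= 0 and blocos[posicao-1] >= blocos[posicao]: posicao -= 1
def avancar_esquerda_lento (blocos : List Int) (posicao : Nat) : Nat :=
  if h : 0 < posicao ∧
      PySem.List.pyGetD blocos ((posicao : Int) - 1) 0 ≥ PySem.List.pyGetD blocos (posicao : Int) 0 then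
    avancar_esquerda_lento blocos (posicao - 1)
  else
    posicao
termination_by posicao

def solucao_lenta (blocos : List Int) : Int :=
  (List.range blocos.length).foldl (fun maior_distancia i =>
    let direita := avancar_direita_lento blocos i
    let esquerda := avancar_esquerda_lento blocos i
    let distancia : Int := (direita : Int) - (esquerda : Int)
    if distancia > maior_distancia then distancia else maior_distancia) 0

-- ===== PORT B =====
def solucao_lenta_alt (blocos : List Int) : Int :=
  let n := blocos.length
  if n = 0 then 0
  else
    let esquerda : List Int := (PySem.List.pyRange 1 (n : Int) 1).foldl
      (fun L i => L ++ [if PySem.List.pyGetD blocos (i - 1) 0 ≥ PySem.List.pyGetD blocos i 0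
                        then PySem.List.pyGetD L (-1) 0 else i]) [0]
    let direita : List Int := (PySem.List.pyRange ((n : Int) - 2) (-1) (-1)).foldl
      (fun R i => R ++ [if PySem.List.pyGetD blocos (i + 1) 0 ≥ PySem.List.pyGetD blocos i 0
                        then PySem.List.pyGetD R (-1) 0 else i]) [(n : Int) - 1]
    let direita2 := direita.reverse
    match PySem.List.max? ((PySem.List.pyRange 0 (n : Int) 1).map
        (fun i => PySem.List.pyGetD direita2 i 0 - PySem.List.pyGetD esquerda i 0)) (fun y => y) with
    | some m => m
    | none => 0

-- ===== PRECONDITION & SPEC =====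
def Spec_solucao_lenta (blocos : List Int) (out : Int) : Prop := out = solucao_lenta_alt blocos
instance (blocos : List Int) (out : Int) : Decidable (Spec_solucao_lenta blocos out) := by unfold Spec_solucao_lenta; infer_instance

-- ===== CLAIM (what is proved, stated in full; the proofs are below) =====
def Claim_equal_solucao_lenta : Prop := ∀ (blocos : List Int), Dom_solucao_lenta blocos → Spec_solucao_lenta blocos (solucao_lenta blocos)

-- ===== LEMMAS AND PROOFS =====

theorem avE_zero (blocos : List Int) : avancar_esquerda_lento blocos 0 = 0 := by
  rw [avancar_esquerda_lento]; simp

theorem avD_last (blocos : List Int) (n : Nat) (hn : blocos.length = n) (h1 : 1 ≤ n) :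
    avancar_direita_lento blocos (n - 1) = n - 1 := by
  rw [avancar_direita_lento]
  have : ¬ (n - 1 + 1 < blocos.length) := by omega
  simp [this]

-- after the left-to-right pass, esquerda[k] = avancar_esquerda_lento blocos k
theorem esquerda_eq (blocos : List Int) (d : Nat) :
    (PySem.List.pyRange 1 ((1 + d : Nat) : Int) 1).foldl
      (fun L i => L ++ [if PySem.List.pyGetD blocos (i - 1) 0 ≥ PySem.List.pyGetD blocos i 0
                        then PySem.List.pyGetD L (-1) 0 else i]) [0]
      = (List.range (1 + d)).map (fun k => (avancar_esquerda_lento blocos k : Int)) := by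
  induction d with
  | zero =>
    rw [PySem.List.pyRange_one_eq_nil (by norm_num)]
    simp [List.range_succ, avE_zero]
  | succ d ih =>
    have hc : ((1 + (d + 1) : Nat) : Int) = ((1 + d : Nat) : Int) + 1 := by push_cast; ring
    rw [hc, PySem.List.pyRange_one_succ_right (by push_cast; omega), List.foldl_append, ih]
    simp only [List.foldl_cons, List.foldl_nil]
    have hrange : List.range (1 + (d + 1)) = List.range (1 + d) ++ [1 + d] := by
      have : 1 + (d + 1) = (1 + d) + 1 := by omega
      rw [this, List.range_succ]
    rw [hrange, List.map_append]
    congr 1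
    have hlast : PySem.List.pyGetD ((List.range (1 + d)).map (fun k => (avancar_esquerda_lento blocos k : Int))) (-1) 0
        = (avancar_esquerda_lento blocos d : Int) := by
      have : List.range (1 + d) = List.range d ++ [d] := by rw [Nat.add_comm, List.range_succ]
      rw [this, List.map_append]
      exact PySem.List.pyGetD_neg_one_append_singleton _ _ _
    have hidx : ((1 + d : Nat) : Int) - 1 = ((d : Nat) : Int) := by push_cast; ring
    rw [hidx, hlast]
    have heq : (avancar_esquerda_lento blocos (1 + d) : Int) =
        if PySem.List.pyGetD blocos ((d : Nat) : Int) 0 ≥ PySem.List.pyGetD blocos ((1 + d : Nat) : Int) 0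
        then (avancar_esquerda_lento blocos d : Int) else ((1 + d : Nat) : Int) := by
      rw [avancar_esquerda_lento]
      have h0 : (0:Nat) < 1 + d := by omega
      have h1 : 1 + d - 1 = d := by omega
      have h2 : ((1 + d : Nat) : Int) - 1 = ((d : Nat) : Int) := by push_cast; ring
      rw [h2]
      by_cases hcond : PySem.List.pyGetD blocos ((d : Nat) : Int) 0 ≥ PySem.List.pyGetD blocos ((1 + d : Nat) : Int) 0
      · simp [h0, h1]
      · simp [h0]
    simp [heq]

-- after the right-to-left pass, direita (before reversal) = [avD (n-1), …, avD 0]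
theorem direita_eq (blocos : List Int) (n : Nat) (hn : blocos.length = n) :
    ∀ k, k ≤ n - 1 →
    (PySem.List.pyRange ((k : Int) - 1) (-1) (-1)).foldl
      (fun R i => R ++ [if PySem.List.pyGetD blocos (i + 1) 0 ≥ PySem.List.pyGetD blocos i 0
                        then PySem.List.pyGetD R (-1) 0 else i])
      ((List.range (n - k)).map (fun j => (avancar_direita_lento blocos (n - 1 - j) : Int)))
      = (List.range n).map (fun j => (avancar_direita_lento blocos (n - 1 - j) : Int)) := by
  intro k
  induction k with
  | zero =>
    intro _
    rw [show ((0:Nat):Int) - 1 = -1 by norm_num, PySem.List.pyRange_neg_one_eq_nil (by norm_num)]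
    simp
  | succ k ih =>
    intro hk
    have hk' : k ≤ n - 1 := by omega
    have hcast : ((k + 1 : Nat) : Int) - 1 = (k : Nat) := by push_cast; ring
    rw [hcast, PySem.List.pyRange_neg_one_cons (by omega)]
    simp only [List.foldl_cons]
    have hstep :
        ((List.range (n - (k + 1))).map (fun j => (avancar_direita_lento blocos (n - 1 - j) : Int))) ++
          [if PySem.List.pyGetD blocos ((k : Nat) + 1) 0 ≥ PySem.List.pyGetD blocos ((k : Nat) : Int) 0
           then PySem.List.pyGetD ((List.range (n - (k + 1))).map (fun j => (avancar_direita_lento blocos (n - 1 - j) : Int))) (-1) 0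
           else ((k : Nat) : Int)]
        = (List.range (n - k)).map (fun j => (avancar_direita_lento blocos (n - 1 - j) : Int)) := by
      have hm : n - k = (n - (k + 1)) + 1 := by omega
      rw [hm, List.range_succ, List.map_append]
      congr 1
      have hj : n - 1 - (n - (k + 1)) = k := by omega
      have hlast : PySem.List.pyGetD ((List.range (n - (k + 1))).map (fun j => (avancar_direita_lento blocos (n - 1 - j) : Int))) (-1) 0
          = (avancar_direita_lento blocos (k + 1) : Int) := by
        have hm2 : n - (k + 1) = (n - (k + 2)) + 1 := by omega
        rw [hm2, List.range_succ, List.map_append]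
        simp only [List.map_cons, List.map_nil]
        rw [PySem.List.pyGetD_neg_one_append_singleton]
        have : n - 1 - (n - (k + 2)) = k + 1 := by omega
        rw [this]
      rw [hlast]
      have heq : (avancar_direita_lento blocos k : Int) =
          if PySem.List.pyGetD blocos ((k : Nat) + 1) 0 ≥ PySem.List.pyGetD blocos ((k : Nat) : Int) 0
          then (avancar_direita_lento blocos (k + 1) : Int) else ((k : Nat) : Int) := by
        rw [avancar_direita_lento]
        have hlt : k + 1 < blocos.length := by omega
        by_cases hcond : PySem.List.pyGetD blocos ((k : Nat) + 1) 0 ≥ PySem.List.pyGetD blocos ((k : Nat) : Int) 0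
        · simp [hlt]
        · simp [hlt]
      simp only [List.map_cons, List.map_nil, hj]
      rw [heq]
    rw [hstep]
    exact ih hk'

theorem rev_map_range (f : Nat → Int) (n : Nat) :
    ((List.range n).map (fun j => f (n - 1 - j))).reverse = (List.range n).map f := by
  apply List.ext_getElem (by simp)
  intro i h1 h2
  simp only [List.length_map, List.length_range] at h1 h2
  rw [List.getElem_reverse]
  simp only [List.getElem_map, List.getElem_range, List.length_map, List.length_range]
  congr 1
  omega

theorem solucao_lenta_spec : Claim_equal_solucao_lenta := by
  intro blocos _
  unfold Spec_solucao_lenta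
  by_cases hnil : blocos.length = 0
  · have hb : blocos = [] := List.eq_nil_of_length_eq_zero hnil
    subst hb
    rfl
  · simp only [solucao_lenta_alt, solucao_lenta]
    rw [if_neg hnil]
    set n := blocos.length with hndef
    have hn1 : 1 ≤ n := by omega
    -- left pass
    have hE := esquerda_eq blocos (n - 1)
    rw [show 1 + (n - 1) = n by omega] at hE
    rw [hE]
    -- right pass
    have hD := direita_eq blocos n rfl (n - 1) (le_refl _)
    have hinit : ((List.range (n - (n - 1))).map (fun j => (avancar_direita_lento blocos (n - 1 - j) : Int)))
        = [(n : Int) - 1] := by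
      rw [show n - (n - 1) = 1 by omega]
      simp only [List.range_one, List.map_cons, List.map_nil, Nat.sub_zero]
      rw [avD_last blocos n rfl hn1]
      congr 1
      push_cast [hn1]
      omega
    rw [hinit] at hD
    rw [show (n : Int) - 2 = ((n - 1 : Nat) : Int) - 1 by push_cast [hn1]; omega, hD]
    have hrev := rev_map_range (fun k => (avancar_direita_lento blocos k : Int)) n
    simp only at hrev
    simp only [hrev]
    -- the mapped distances
    have hmap : ((PySem.List.pyRange 0 (n : Int) 1).map
        (fun i => PySem.List.pyGetD ((List.range n).map (fun j => (avancar_direita_lento blocos j : Int))) i 0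
                - PySem.List.pyGetD ((List.range n).map (fun k => (avancar_esquerda_lento blocos k : Int))) i 0))
        = (List.range n).map (fun k => (avancar_direita_lento blocos k : Int) - (avancar_esquerda_lento blocos k : Int)) := by
      rw [PySem.List.pyRange_zero_nat, List.map_map]
      apply List.map_congr_left
      intro k hk
      have hkn : k < n := List.mem_range.mp hk
      simp only [Function.comp_apply, PySem.List.pyGetD_natCast]
      rw [PySem.List.getD_map_range _ _ _ _ hkn, PySem.List.getD_map_range _ _ _ _ hkn]
    rw [hmap]
    -- the running-max loop equals max of the list
    have hbody : (fun (maior_distancia : Int) (i : Nat) =>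
        let direita := avancar_direita_lento blocos i
        let esquerda := avancar_esquerda_lento blocos i
        let distancia : Int := (direita : Int) - (esquerda : Int)
        if distancia > maior_distancia then distancia else maior_distancia)
        = (fun acc i => max acc ((avancar_direita_lento blocos i : Int) - (avancar_esquerda_lento blocos i : Int))) := by
      funext acc i
      simp only []
      rw [max_def]
      split_ifs <;> omega
    rw [hbody]
    obtain ⟨m, hm⟩ : ∃ m, n = m + 1 := ⟨n - 1, by omega⟩
    rw [hm, List.range_succ_eq_map, List.map_cons, PySem.List.max?_id_cons]
    simp only [List.foldl_cons, List.map_map]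
    have h0 : (0 : Int) ⊔ ((avancar_direita_lento blocos 0 : Int) - (avancar_esquerda_lento blocos 0 : Int))
        = (avancar_direita_lento blocos 0 : Int) - (avancar_esquerda_lento blocos 0 : Int) := by
      rw [avE_zero]
      have := Int.natCast_nonneg (avancar_direita_lento blocos 0)
      omega
    rw [h0, List.foldl_map]
    simp only [Function.comp_def, Nat.succ_eq_add_one]
    rw [List.foldl_map]
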